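-- pv_equiv track=rewrite | github.com/JosephsDeadish/Panda-Sorter-Converter-Upscaler-background-remover-and-line-art-too | src/organizer/organization_styles.py | _console_map_type
-- ===== SOURCE A (Python) =====
-- def _console_map_type(name: str) -> str:
--     """Derive map-type folder from filename suffixes / keywords."""
--     n = name.lower()
--     if any(s in n for s in ('_nrm', '_norm', '_n.', '_n_', 'normal')):
--         return 'Normal'
--     if any(s in n for s in ('_spc', '_spec', '_s.', '_s_', 'specular', 'gloss')):
--         return 'Specular'
--     if any(s in n for s in ('_emi', '_emis', '_e.', '_e_', 'emissive', 'glow')):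
--         return 'Emissive'
--     if any(s in n for s in ('_alp', '_a.', '_a_', 'alpha', '_msk', 'mask')):
--         return 'Alpha'
--     # Default → diffuse
--     return 'Diffuse'
-- ===== SOURCE B (Python) =====
-- FOLDERS = ('Normal', 'Specular', 'Emissive', 'Alpha', 'Diffuse')
-- PREFIX_GROUPS = (
--     ('_nrm', '_norm', '_n.', '_n_', 'normal'),
--     ('_spc', '_spec', '_s.', '_s_', 'specular', 'gloss'),
--     ('_emi', '_emis', '_e.', '_e_', 'emissive', 'glow'),
--     ('_alp', '_a.', '_a_', 'alpha', '_msk', 'mask'),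
-- )
--
--
-- def _rank_at(n, i):
--     """Rank of the best (lowest-numbered) keyword group starting at position i."""
--     for rank, keys in enumerate(PREFIX_GROUPS):
--         if n.startswith(keys, i):
--             return rank
--     return len(PREFIX_GROUPS)
--
--
-- def _console_map_type(name: str) -> str:
--     """Single left-to-right sweep keeping the minimal matched group rank."""
--     n = name.lower()
--     best = len(PREFIX_GROUPS)
--     for i in range(len(n)):
--         r = _rank_at(n, i)
--         if r < best:
--             best = r
--     return FOLDERS[best]
-- ===== Notes on version B (the rewrite author's own statement) =====
-- stated objective: alternative
-- what changed: Instead of four staged any-substring-membership passes over keyword groups, B makes a single left-to-right sweep over the character positions of the lowercased name, computing at each position the rank of the best keyword group starting there via tuple-startswith and keeping the minimum rank, then indexes a folder table by that rank.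
import Mathlib
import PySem

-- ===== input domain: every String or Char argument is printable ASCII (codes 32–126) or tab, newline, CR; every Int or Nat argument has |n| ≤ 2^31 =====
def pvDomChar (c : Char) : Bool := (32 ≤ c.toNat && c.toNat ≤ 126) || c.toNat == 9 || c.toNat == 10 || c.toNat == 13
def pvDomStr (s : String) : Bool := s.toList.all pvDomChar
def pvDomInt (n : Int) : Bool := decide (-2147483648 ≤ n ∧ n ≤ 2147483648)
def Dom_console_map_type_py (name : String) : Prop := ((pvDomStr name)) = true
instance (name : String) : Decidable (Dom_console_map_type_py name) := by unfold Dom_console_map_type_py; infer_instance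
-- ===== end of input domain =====

-- B replaces A's four staged per-keyword substring-membership passes by a single left-to-right sweep
-- over the character positions that keeps the minimal matched group rank (objective: alternative).

-- ===== PORT A =====
def console_map_type_py (name : String) : String :=
  let n := PySem.Str.lower name
  if ["_nrm", "_norm", "_n.", "_n_", "normal"].any (fun s => PySem.Str.isIn s n) then "Normal"
  else if ["_spc", "_spec", "_s.", "_s_", "specular", "gloss"].any (fun s => PySem.Str.isIn s n) then "Specular"
  else if ["_emi", "_emis", "_e.", "_e_", "emissive", "glow"].any (fun s => PySem.Str.isIn s n) then "Emissive"
  else if ["_alp", "_a.", "_a_", "alpha", "_msk", "mask"].any (fun s => PySem.Str.isIn s n) then "Alpha"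
  else "Diffuse"

-- ===== PORT B =====
def pvFolders : List String := ["Normal", "Specular", "Emissive", "Alpha", "Diffuse"]

def pvGroups : List (List String) :=
  [["_nrm", "_norm", "_n.", "_n_", "normal"],
   ["_spc", "_spec", "_s.", "_s_", "specular", "gloss"],
   ["_emi", "_emis", "_e.", "_e_", "emissive", "glow"],
   ["_alp", "_a.", "_a_", "alpha", "_msk", "mask"]]

-- _rank_at(n, i): first group whose tuple-startswith fires at position i, else len(PREFIX_GROUPS)
-- (n.startswith(keys, i) for 0 ≤ i is exactly 'some key is a prefix of n[i:]', i.e. of n.drop i.toNat)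
def pvRankAt (n : List Char) (i : Int) : Nat :=
  match (PySem.List.enumerate pvGroups 0).find?
      (fun rk => rk.2.any (fun kw => PySem.Chars.startswith (n.drop i.toNat) kw.toList)) with
  | some rk => rk.1.toNat
  | none => pvGroups.length

def console_map_type_py_alt (name : String) : String :=
  let n := (PySem.Str.lower name).toList
  let best := (PySem.List.pyRange 0 (n.length : Int) 1).foldl
      (fun b i => let r := pvRankAt n i; if r < b then r else b) pvGroups.length
  pvFolders.getD best "Diffuse"

-- ===== PRECONDITION & SPEC =====
def Spec_console_map_type_py (name : String) (out : String) : Prop := out = console_map_type_py_alt name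
instance (name : String) (out : String) : Decidable (Spec_console_map_type_py name out) := by unfold Spec_console_map_type_py; infer_instance

-- ===== CLAIM (what is proved, stated in full; the proofs are below) =====
def Claim_equal_console_map_type_py : Prop := ∀ (name : String), Dom_console_map_type_py name → Spec_console_map_type_py name (console_map_type_py name)

-- ===== LEMMAS AND PROOFS =====

-- pvP m r i: some keyword of group r starts at position i of m
def pvP (m : String) (r : Nat) (i : Int) : Bool :=
  (pvGroups.getD r []).any (fun kw => PySem.Chars.startswith (m.toList.drop i.toNat) kw.toList)

-- pvM m r: some keyword of group r occurs anywhere in m (A's per-group test)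
def pvM (m : String) (r : Nat) : Bool :=
  (pvGroups.getD r []).any (fun kw => PySem.Str.isIn kw m)

theorem pvRankAt_eq (m : String) (i : Int) :
    pvRankAt m.toList i =
      if pvP m 0 i then 0 else if pvP m 1 i then 1 else
      if pvP m 2 i then 2 else if pvP m 3 i then 3 else 4 := by
  have hE : PySem.List.enumerate pvGroups 0 =
      [((0:Int), pvGroups.getD 0 []), (1, pvGroups.getD 1 []), (2, pvGroups.getD 2 []),
       (3, pvGroups.getD 3 [])] := rfl
  unfold pvRankAt
  rw [hE]
  by_cases h0 : pvP m 0 i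
  · rw [List.find?_cons_of_pos (by exact h0)]; simp [h0]
  · rw [List.find?_cons_of_neg (by exact h0)]
    by_cases h1 : pvP m 1 i
    · rw [List.find?_cons_of_pos (by exact h1)]; simp [h0, h1]
    · rw [List.find?_cons_of_neg (by exact h1)]
      by_cases h2 : pvP m 2 i
      · rw [List.find?_cons_of_pos (by exact h2)]; simp [h0, h1, h2]
      · rw [List.find?_cons_of_neg (by exact h2)]
        by_cases h3 : pvP m 3 i
        · rw [List.find?_cons_of_pos (by exact h3)]; simp [h0, h1, h2, h3]
        · rw [List.find?_cons_of_neg (by exact h3), List.find?_nil]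
          simp [h0, h1, h2, h3, pvGroups]

theorem pvKw_nonempty (r : Nat) (hr : r < 4) : ∀ kw ∈ pvGroups.getD r [], kw.toList ≠ [] := by
  interval_cases r <;> decide

theorem pvM_of_pvP (m : String) (r : Nat) (i : Int) (h : pvP m r i = true) : pvM m r = true := by
  rcases List.any_eq_true.mp h with ⟨kw, hkw, hs⟩
  refine List.any_eq_true.mpr ⟨kw, hkw, ?_⟩
  have hpre : kw.toList <+: m.toList.drop i.toNat := (PySem.Chars.startswith_iff _ _).mp hs
  exact (PySem.Str.isIn_iff_infix _ _).mpr (hpre.isInfix.trans (List.drop_suffix _ _).isInfix)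

theorem exists_pos_of_pvM (m : String) (r : Nat) (hr : r < 4) (h : pvM m r = true) :
    ∃ i ∈ PySem.List.pyRange 0 (m.toList.length : Int) 1, pvP m r i = true := by
  rcases List.any_eq_true.mp h with ⟨kw, hkw, hin⟩
  rcases (PySem.Str.isIn_iff_infix _ _).mp hin with ⟨s, t, hst⟩
  have hne : kw.toList ≠ [] := pvKw_nonempty r hr kw hkw
  have hlen : s.length < m.toList.length := by
    have h1 := congrArg List.length hst
    simp [List.length_append] at h1
    have h2 : m.toList.length = m.length := by simp
    have h3 : 0 < kw.length := by
      have := List.length_pos_of_ne_nil hne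
      simpa using this
    omega
  refine ⟨(s.length : Int), ?_, ?_⟩
  · rw [PySem.List.mem_pyRange_one]; constructor <;> [positivity; exact_mod_cast hlen]
  · refine List.any_eq_true.mpr ⟨kw, hkw, ?_⟩
    apply (PySem.Chars.startswith_iff _ _).mpr
    have : m.toList.drop s.length = kw.toList ++ t := by
      rw [← hst, List.append_assoc, List.drop_left]
    simp [this]

theorem foldl_min_le_init (f : Int → Nat) (L : List Int) (b : Nat) :
    L.foldl (fun b i => if f i < b then f i else b) b ≤ b := by
  induction L generalizing b with
  | nil => simp
  | cons x L ih => exact le_trans (ih _) (by dsimp; split <;> omega)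

theorem foldl_min_le_mem (f : Int → Nat) (L : List Int) (b : Nat) (i : Int) (hi : i ∈ L) :
    L.foldl (fun b i => if f i < b then f i else b) b ≤ f i := by
  induction L generalizing b with
  | nil => simp at hi
  | cons x L ih =>
    rcases List.mem_cons.mp hi with h | h
    · subst h; exact le_trans (foldl_min_le_init f L _) (by dsimp; split <;> omega)
    · exact ih _ h

theorem foldl_min_cases (f : Int → Nat) (L : List Int) (b : Nat) :
    L.foldl (fun b i => if f i < b then f i else b) b = b ∨
      ∃ i ∈ L, L.foldl (fun b i => if f i < b then f i else b) b = f i := by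
  induction L generalizing b with
  | nil => left; rfl
  | cons x L ih =>
    rcases ih (if f x < b then f x else b) with h | ⟨i, hi, h⟩
    · by_cases hx : f x < b
      · right; exact ⟨x, List.mem_cons_self, by simpa [hx] using h⟩
      · left; simpa [hx] using h
    · right; exact ⟨i, List.mem_cons_of_mem _ hi, h⟩

theorem pvRank_le (m : String) (i : Int) (r : Nat) (hr : r < 4) (h : pvP m r i = true) :
    pvRankAt m.toList i ≤ r := by
  rw [pvRankAt_eq]
  interval_cases r <;> split_ifs <;> simp_all

theorem pvLe_rank (m : String) (i : Int) (r : Nat) (hr : r ≤ 4)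
    (h : ∀ r' < r, pvP m r' i = false) : r ≤ pvRankAt m.toList i := by
  rw [pvRankAt_eq]
  have h0 := fun hh : 0 < r => h 0 hh
  have h1 := fun hh : 1 < r => h 1 hh
  have h2 := fun hh : 2 < r => h 2 hh
  have h3 := fun hh : 3 < r => h 3 hh
  interval_cases r <;> split_ifs <;> simp_all

theorem pvBest_eq (m : String) :
    (PySem.List.pyRange 0 (m.toList.length : Int) 1).foldl
      (fun b i => if pvRankAt m.toList i < b then pvRankAt m.toList i else b) 4 =
    (if pvM m 0 then 0 else if pvM m 1 then 1 else
     if pvM m 2 then 2 else if pvM m 3 then 3 else 4) := by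
  have hub : ∀ r, r < 4 → pvM m r = true →
      (PySem.List.pyRange 0 (m.toList.length : Int) 1).foldl
        (fun b i => if pvRankAt m.toList i < b then pvRankAt m.toList i else b) 4 ≤ r := by
    intro r hr h
    obtain ⟨i, hi, hp⟩ := exists_pos_of_pvM m r hr h
    exact le_trans (foldl_min_le_mem _ _ 4 i hi) (pvRank_le m i r hr hp)
  have hlb : ∀ r, r ≤ 4 → (∀ r' < r, pvM m r' = false) →
      r ≤ (PySem.List.pyRange 0 (m.toList.length : Int) 1).foldl
        (fun b i => if pvRankAt m.toList i < b then pvRankAt m.toList i else b) 4 := by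
    intro r hr h
    rcases foldl_min_cases (fun i => pvRankAt m.toList i)
        (PySem.List.pyRange 0 (m.toList.length : Int) 1) 4 with hc | ⟨i, hi, hc⟩
    · rw [hc]; omega
    · rw [hc]
      apply pvLe_rank m i r hr
      intro r' hr'
      cases hp : pvP m r' i with
      | false => rfl
      | true => exact absurd (pvM_of_pvP m r' i hp) (by simp [h r' hr'])
  by_cases hM0 : pvM m 0 = true
  · have := hub 0 (by omega) hM0
    rw [if_pos hM0]; omega
  · have e0 : pvM m 0 = false := by simpa using hM0
    by_cases hM1 : pvM m 1 = true
    · have hu := hub 1 (by omega) hM1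
      have hl := hlb 1 (by omega) (by intro r' hr'; interval_cases r'; simp [e0])
      rw [if_neg hM0, if_pos hM1]; omega
    · have e1 : pvM m 1 = false := by simpa using hM1
      by_cases hM2 : pvM m 2 = true
      · have hu := hub 2 (by omega) hM2
        have hl := hlb 2 (by omega) (by intro r' hr'; interval_cases r' <;> simp [e0, e1])
        rw [if_neg hM0, if_neg hM1, if_pos hM2]; omega
      · have e2 : pvM m 2 = false := by simpa using hM2
        by_cases hM3 : pvM m 3 = true
        · have hu := hub 3 (by omega) hM3
          have hl := hlb 3 (by omega) (by intro r' hr'; interval_cases r' <;> simp [e0, e1, e2])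
          rw [if_neg hM0, if_neg hM1, if_neg hM2, if_pos hM3]; omega
        · have e3 : pvM m 3 = false := by simpa using hM3
          have hu := foldl_min_le_init (fun i => pvRankAt m.toList i)
            (PySem.List.pyRange 0 (m.toList.length : Int) 1) 4
          have hl := hlb 4 (by omega) (by intro r' hr'; interval_cases r' <;> simp [e0, e1, e2, e3])
          rw [if_neg hM0, if_neg hM1, if_neg hM2, if_neg hM3]; omega

-- ===== VERDICT (by name: the statement is the Claim_ definition above) =====
theorem console_map_type_py_spec : Claim_equal_console_map_type_py := by
  intro name _
  unfold Spec_console_map_type_py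
  have hA : console_map_type_py name =
      (if pvM (PySem.Str.lower name) 0 then "Normal"
       else if pvM (PySem.Str.lower name) 1 then "Specular"
       else if pvM (PySem.Str.lower name) 2 then "Emissive"
       else if pvM (PySem.Str.lower name) 3 then "Alpha" else "Diffuse") := rfl
  have hB : console_map_type_py_alt name =
      pvFolders.getD
        ((PySem.List.pyRange 0 (((PySem.Str.lower name).toList.length : Int)) 1).foldl
          (fun b i => if pvRankAt (PySem.Str.lower name).toList i < b
                      then pvRankAt (PySem.Str.lower name).toList i else b) 4) "Diffuse" := rfl
  rw [hA, hB, pvBest_eq]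
  split_ifs <;> rfl
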